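-- pv_equiv track=rewrite | github.com/AKranz-dev/LeetCode | Accepted/NumberOfEvenAndOddBits.py | evenOddBit
-- ===== SOURCE A (Python) =====
-- def evenOddBit(n: int) -> list[int]:
--
--     evenCounter = 0
--     oddCounter = 0
--     returnList = []
--     binList = []
--     cleanList = []
--
--
--
--     for num in str(bin(n)):
--         binList.append(num)
--
--
--     binList.reverse()
--
--     for item in binList:
--         if item.isnumeric():
--             cleanList.append(item)
--         else:
--             break
--
--     for i in range(0,len(cleanList)):
--         if cleanList[i] == "1":
--             if i == 0 or i%2 == 0:
--                 evenCounter+=1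
--             else:
--                 oddCounter +=1
--
--
--     returnList.append(evenCounter)
--     returnList.append(oddCounter)
--
--     return returnList
-- ===== SOURCE B (Python) =====
-- def evenOddBit(n: int) -> list[int]:
--     m = abs(n)
--     evenCounter = 0
--     oddCounter = 0
--     pos = 0
--     while m:
--         if m & 1:
--             if pos % 2 == 0:
--                 evenCounter += 1
--             else:
--                 oddCounter += 1
--         pos += 1
--         m >>= 1
--     return [evenCounter, oddCounter]
-- ===== Notes on version B (the rewrite author's own statement) =====
-- stated objective: simpler
-- what changed: Replaces A's bin()-string/reverse/takeWhile/index-loop pipeline with a single while-loop doing bit arithmetic (m & 1, m >>= 1) on abs(n).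
import Mathlib
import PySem

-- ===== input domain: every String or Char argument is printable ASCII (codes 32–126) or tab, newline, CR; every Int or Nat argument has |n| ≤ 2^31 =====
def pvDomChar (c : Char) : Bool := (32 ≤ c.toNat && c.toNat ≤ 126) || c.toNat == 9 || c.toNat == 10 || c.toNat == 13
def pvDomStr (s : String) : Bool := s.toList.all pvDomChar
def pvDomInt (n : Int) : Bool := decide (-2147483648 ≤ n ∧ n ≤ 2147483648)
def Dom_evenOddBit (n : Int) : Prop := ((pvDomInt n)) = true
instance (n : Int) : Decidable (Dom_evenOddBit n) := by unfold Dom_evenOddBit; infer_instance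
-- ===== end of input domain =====

-- B replaces A's string/reverse/filter pipeline over bin(n) by direct bit arithmetic on abs(n); objective: simpler.

-- ===== PORT A =====
-- hand port of Python's bin() digit loop: binary digits of m, most significant first ([] for m = 0); exact
def pvBinDigits (m : Nat) : List Char :=
  if m = 0 then []
  else pvBinDigits (m / 2) ++ [if m % 2 = 1 then '1' else '0']
decreasing_by exact Nat.div_lt_self (Nat.pos_of_ne_zero (by assumption)) (by norm_num)

-- hand port of str(bin(n)) as a character list: '-' sign, '0b' prefix, digits ('0' for n = 0); exact
def pvBinStr (n : Int) : List Char :=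
  (if n < 0 then ['-'] else []) ++ ['0', 'b'] ++
    (if n.natAbs = 0 then ['0'] else pvBinDigits n.natAbs)

def evenOddBit (n : Int) : List Int :=
  -- for num in str(bin(n)): binList.append(num)
  let binList := (pvBinStr n).foldl (fun acc c => acc ++ [c]) []
  -- binList.reverse()
  let binList := binList.reverse
  -- for item in binList: if item.isnumeric(): cleanList.append(item) else: break
  -- (isnumeric on the characters of bin(): digits vs 'b'/'-'; Char.isDigit is exact here)
  let cleanList := binList.takeWhile (fun c => c.isDigit)
  -- for i in range(0, len(cleanList)): …
  let p := (PySem.List.pyRange 0 (cleanList.length : Int) 1).foldl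
    (fun (p : Int × Int) i =>
      if PySem.List.pyGetD cleanList i ' ' = '1' then
        if i = 0 ∨ i % 2 = 0 then (p.1 + 1, p.2) else (p.1, p.2 + 1)
      else p) (0, 0)
  [p.1, p.2]

-- ===== PORT B =====
-- while m: if m & 1: bump even/odd by pos parity; pos += 1; m >>= 1
def pvBLoop (m : Nat) (pos : Int) (ec oc : Int) : Int × Int :=
  if m = 0 then (ec, oc)
  else
    let (ec, oc) :=
      if m % 2 = 1 then (if pos % 2 = 0 then (ec + 1, oc) else (ec, oc + 1))
      else (ec, oc)
    pvBLoop (m / 2) (pos + 1) ec oc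
decreasing_by exact Nat.div_lt_self (Nat.pos_of_ne_zero (by assumption)) (by norm_num)

def evenOddBit_alt (n : Int) : List Int :=
  let p := pvBLoop n.natAbs 0 0 0
  [p.1, p.2]

-- ===== PRECONDITION & SPEC =====
def Spec_evenOddBit (n : Int) (out : List Int) : Prop := out = evenOddBit_alt n
instance (n : Int) (out : List Int) : Decidable (Spec_evenOddBit n out) := by unfold Spec_evenOddBit; infer_instance

-- ===== CLAIM (what is proved, stated in full; the proofs are below) =====
def Claim_equal_evenOddBit : Prop := ∀ (n : Int), Dom_evenOddBit n → Spec_evenOddBit n (evenOddBit n)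

-- ===== LEMMAS AND PROOFS =====

-- least-significant-bit-first digit list of m
def pvLsb (m : Nat) : List Char :=
  if m = 0 then [] else (if m % 2 = 1 then '1' else '0') :: pvLsb (m / 2)
decreasing_by exact Nat.div_lt_self (Nat.pos_of_ne_zero (by assumption)) (by norm_num)

-- A's loop body, as a structural recursion over the digit list with an explicit position
def pvALoop (L : List Char) (pos : Int) (p : Int × Int) : Int × Int :=
  match L with
  | [] => p
  | c :: t =>
      pvALoop t (pos + 1)
        (if c = '1' then
          if pos = 0 ∨ pos % 2 = 0 then (p.1 + 1, p.2) else (p.1, p.2 + 1)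
        else p)

theorem foldl_append_id (xs : List Char) (acc : List Char) :
    xs.foldl (fun acc c => acc ++ [c]) acc = acc ++ xs := by
  induction xs generalizing acc with
  | nil => simp
  | cons c t ih => simp [List.foldl, ih]

theorem reverse_binDigits (m : Nat) : (pvBinDigits m).reverse = pvLsb m := by
  induction m using Nat.strong_induction_on with
  | _ m ih =>
    rw [pvBinDigits, pvLsb]
    by_cases h : m = 0
    · simp [h]
    · rw [if_neg h, if_neg h, List.reverse_append,
        ih (m / 2) (Nat.div_lt_self (Nat.pos_of_ne_zero h) (by norm_num))]
      simp

theorem lsb_all_digit (m : Nat) : ∀ c ∈ pvLsb m, c.isDigit = true := by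
  induction m using Nat.strong_induction_on with
  | _ m ih =>
    rw [pvLsb]
    by_cases h : m = 0
    · simp [h]
    · simp only [if_neg h, List.mem_cons]
      rintro c (rfl | hc)
      · split <;> decide
      · exact ih (m / 2) (Nat.div_lt_self (Nat.pos_of_ne_zero h) (by norm_num)) c hc

theorem takeWhile_all_append (p : Char → Bool) (xs : List Char) (y : Char) (ys : List Char)
    (hx : ∀ c ∈ xs, p c = true) (hy : p y = false) :
    (xs ++ y :: ys).takeWhile p = xs := by
  induction xs with
  | nil => simp [List.takeWhile, hy]
  | cons c t ih =>
      simp only [List.cons_append, List.takeWhile_cons, hx c (by simp)]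
      rw [ih (fun c hc => hx c (by simp [hc]))]
      simp

-- cleanList is exactly the LSB-first digit list
theorem cleanList_eq (n : Int) :
    (((pvBinStr n).foldl (fun acc c => acc ++ [c]) []).reverse.takeWhile
        (fun c => c.isDigit)) = (if n.natAbs = 0 then ['0'] else pvLsb n.natAbs) := by
  rw [foldl_append_id, List.nil_append, pvBinStr]
  by_cases h : n.natAbs = 0
  · simp only [h]
    by_cases hn : n < 0
    · rw [if_pos hn]; decide
    · rw [if_neg hn]; decide
  · simp only [if_neg h, List.append_assoc, List.reverse_append]
    rw [reverse_binDigits]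
    by_cases hn : n < 0 <;>
      · simp only [hn, if_pos, if_neg, List.reverse_cons, List.reverse_nil,
          List.nil_append, List.cons_append, List.append_assoc]
        rw [takeWhile_all_append (fun c => c.isDigit) _ 'b' _ (lsb_all_digit n.natAbs) (by decide)]

-- the index-fold over pyRange equals the structural recursion pvALoop
theorem pvALoop_append (L : List Char) (c : Char) :
    ∀ (pos : Int) (p : Int × Int),
      pvALoop (L ++ [c]) pos p =
        (fun q => if c = '1' then
            if pos + L.length = 0 ∨ (pos + L.length) % 2 = 0 then (q.1 + 1, q.2)
            else (q.1, q.2 + 1)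
          else q) (pvALoop L pos p) := by
  induction L with
  | nil => intro pos p; simp [pvALoop]
  | cons d t ih =>
      intro pos p
      simp only [List.cons_append, pvALoop, ih, List.length_cons]
      rw [show (pos + ((t.length + 1 : Nat) : Int)) = pos + 1 + (t.length : Int) by
        push_cast; ring]

theorem fold_eq_aLoop (L : List Char) :
    (PySem.List.pyRange 0 (L.length : Int) 1).foldl
      (fun (p : Int × Int) i =>
        if PySem.List.pyGetD L i ' ' = '1' then
          if i = 0 ∨ i % 2 = 0 then (p.1 + 1, p.2) else (p.1, p.2 + 1)
        else p) (0, 0) = pvALoop L 0 (0, 0) := by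
  induction L using List.reverseRecOn with
  | nil => simp [pvALoop, PySem.List.pyRange_one_eq_nil]
  | append_singleton t c ih =>
      rw [List.length_append, List.length_singleton]
      push_cast
      rw [PySem.List.pyRange_one_succ_right (by positivity), List.foldl_append]
      have hcong :
          (PySem.List.pyRange 0 (t.length : Int) 1).foldl
            (fun (p : Int × Int) i =>
              if PySem.List.pyGetD (t ++ [c]) i ' ' = '1' then
                if i = 0 ∨ i % 2 = 0 then (p.1 + 1, p.2) else (p.1, p.2 + 1)
              else p) (0, 0)
          = (PySem.List.pyRange 0 (t.length : Int) 1).foldl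
            (fun (p : Int × Int) i =>
              if PySem.List.pyGetD t i ' ' = '1' then
                if i = 0 ∨ i % 2 = 0 then (p.1 + 1, p.2) else (p.1, p.2 + 1)
              else p) (0, 0) := by
        apply PySem.List.foldl_congr_mem
        intro p i hi
        have hmem := (PySem.List.mem_pyRange_one).mp hi
        obtain ⟨k, rfl, hk⟩ : ∃ k : Nat, i = (k : Int) ∧ k < t.length :=
          ⟨i.toNat, by omega, by omega⟩
        rw [PySem.List.pyGetD_natCast, PySem.List.pyGetD_natCast,
          List.getD_eq_getElem?_getD, List.getD_eq_getElem?_getD,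
          List.getElem?_append_left hk]
      rw [hcong, ih, List.foldl_cons, List.foldl_nil, pvALoop_append]
      have : PySem.List.pyGetD (t ++ [c]) (t.length : Int) ' ' = c := by
        rw [PySem.List.pyGetD_natCast]
        simp
      rw [this]
      simp

-- pvALoop over the LSB digits is exactly B's bit loop
theorem aLoop_lsb (m : Nat) : ∀ (pos ec oc : Int),
    pvALoop (pvLsb m) pos (ec, oc) = pvBLoop m pos ec oc := by
  induction m using Nat.strong_induction_on with
  | _ m ih =>
    intro pos ec oc
    rw [pvLsb, pvBLoop]
    by_cases h : m = 0
    · simp [h, pvALoop]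
    · simp only [if_neg h]
      rw [pvALoop]
      have hrec := ih (m / 2) (Nat.div_lt_self (Nat.pos_of_ne_zero h) (by norm_num))
      have hpos : (pos = 0 ∨ pos % 2 = 0) ↔ pos % 2 = 0 := by
        constructor
        · rintro (rfl | h) <;> simp [h]
        · exact Or.inr
      by_cases hb : m % 2 = 1
      · simp only [hb, if_pos rfl, if_pos]
        by_cases hp : pos % 2 = 0
        · simp [hp, hpos, hrec]
        · have hp0 : pos ≠ 0 := by rintro rfl; simp at hp
          simp [hp, hp0, hrec]
      · have : ¬((if m % 2 = 1 then '1' else '0') = '1') := by simp [hb]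
        simp [this, hb, hrec]

-- ===== VERDICT (by name: the statement is the Claim_ definition above) =====
theorem evenOddBit_spec : Claim_equal_evenOddBit := by
  intro n _
  unfold Spec_evenOddBit evenOddBit evenOddBit_alt
  simp only
  rw [cleanList_eq]
  by_cases h : n.natAbs = 0
  · simp only [h, if_pos rfl]
    rw [show pvBLoop 0 0 0 0 = (0, 0) from by rw [pvBLoop]; simp]
    decide
  · rw [if_neg h, fold_eq_aLoop, aLoop_lsb]
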